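-- pv_equiv track=rewrite | github.com/jonm/wow-econometrics | lambda-iteminfo/iteminfo.py | _get_bonus_lists
-- ===== SOURCE A (Python) =====
-- def _get_bonus_lists(auc):
--     if 'bonusLists' not in auc: return []
--     out = []
--     for obj in auc['bonusLists']:
--         if 'bonusListId' in obj:
--             blid = obj['bonusListId']
--             if blid not in out: out.append(blid)
--     out.sort()
--     return out
-- ===== SOURCE B (Python) =====
-- def _get_bonus_lists(auc):
--     if 'bonusLists' not in auc:
--         return []
--     vals = []
--     for obj in auc['bonusLists']:
--         if 'bonusListId' in obj:
--             vals.append(obj['bonusListId'])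
--     vals.sort()
--     out = []
--     prev = None
--     for v in vals:
--         if prev is None or v != prev:
--             out.append(v)
--             prev = v
--     return out
-- ===== Notes on version B (the rewrite author's own statement) =====
-- stated objective: alternative
-- what changed: A dedups via a linear membership scan on the growing output before sorting (quadratic in the number of distinct ids); B collects all ids with duplicates, sorts, then eliminates adjacent duplicates in one linear pass.
import Mathlib
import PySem

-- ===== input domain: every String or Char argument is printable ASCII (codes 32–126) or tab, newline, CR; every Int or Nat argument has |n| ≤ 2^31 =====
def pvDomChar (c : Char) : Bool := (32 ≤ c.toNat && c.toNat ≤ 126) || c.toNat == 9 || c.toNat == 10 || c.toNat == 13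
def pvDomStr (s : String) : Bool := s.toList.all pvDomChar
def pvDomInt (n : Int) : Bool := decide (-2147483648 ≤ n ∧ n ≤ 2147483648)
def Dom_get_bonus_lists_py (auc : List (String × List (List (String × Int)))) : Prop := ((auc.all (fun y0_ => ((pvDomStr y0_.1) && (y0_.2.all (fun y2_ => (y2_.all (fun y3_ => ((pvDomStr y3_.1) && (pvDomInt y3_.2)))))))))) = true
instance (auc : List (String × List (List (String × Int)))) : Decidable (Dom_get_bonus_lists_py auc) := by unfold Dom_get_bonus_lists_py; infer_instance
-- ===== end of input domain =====

-- B sorts the full multiset of ids and removes adjacent duplicates in one pass,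
-- instead of A's membership-scan dedup before sorting (alternative decomposition, same result).

-- first-match association-list lookup (Python dict access under the type convention)
def pvLookup {β : Type} : List (String × β) → String → Option β
  | [], _ => none
  | (k', v) :: rest, k => if k' = k then some v else pvLookup rest k

-- ===== PORT A =====
def get_bonus_lists_py (auc : List (String × List (List (String × Int)))) : List Int :=
  match pvLookup auc "bonusLists" with
  | none => []
  | some objs =>
    let out := objs.foldl (fun out obj =>
      match pvLookup obj "bonusListId" with
      | none => out
      | some blid => if blid ∈ out then out else out ++ [blid]) []
    PySem.List.sorted out (fun x => x) false

-- ===== PORT B =====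
-- the loop body of B's adjacent-dedup pass
def pvStep (st : List Int × Option Int) (v : Int) : List Int × Option Int :=
  match st.2 with
  | none => (st.1 ++ [v], some v)
  | some p => if v ≠ p then (st.1 ++ [v], some v) else st

def get_bonus_lists_py_alt (auc : List (String × List (List (String × Int)))) : List Int :=
  match pvLookup auc "bonusLists" with
  | none => []
  | some objs =>
    let vals := objs.foldl (fun acc obj =>
      match pvLookup obj "bonusListId" with
      | none => acc
      | some blid => acc ++ [blid]) []
    let svals := PySem.List.sorted vals (fun x => x) false
    (svals.foldl pvStep ([], none)).1

-- ===== PRECONDITION & SPEC =====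
def Spec_get_bonus_lists_py (auc : List (String × List (List (String × Int)))) (out : List Int) : Prop := out = get_bonus_lists_py_alt auc
instance (auc : List (String × List (List (String × Int)))) (out : List Int) : Decidable (Spec_get_bonus_lists_py auc out) := by unfold Spec_get_bonus_lists_py; infer_instance

-- ===== CLAIM (what is proved, stated in full; the proofs are below) =====
def Claim_equal_get_bonus_lists_py : Prop := ∀ (auc : List (String × List (List (String × Int)))), Dom_get_bonus_lists_py auc → Spec_get_bonus_lists_py auc (get_bonus_lists_py auc)

-- ===== LEMMAS AND PROOFS =====

-- the sequence of bonusListId values, duplicates kept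
def pvExtract (objs : List (List (String × Int))) : List Int :=
  objs.flatMap (fun obj => (pvLookup obj "bonusListId").toList)

-- recursive form of B's adjacent-duplicate elimination
def pvDedupAdj : Option Int → List Int → List Int
  | _, [] => []
  | none, v :: vs => v :: pvDedupAdj (some v) vs
  | some p, v :: vs => if v ≠ p then v :: pvDedupAdj (some v) vs else pvDedupAdj (some p) vs

-- A's inner loop is the first-occurrence dedup of the extracted id sequence
theorem foldlA_eq (objs : List (List (String × Int))) (acc : List Int) :
    objs.foldl (fun out obj =>
      match pvLookup obj "bonusListId" with
      | none => out
      | some blid => if blid ∈ out then out else out ++ [blid]) acc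
    = (pvExtract objs).foldl (fun out b => if b ∈ out then out else out ++ [b]) acc := by
  induction objs generalizing acc with
  | nil => rfl
  | cons o os ih =>
    simp only [List.foldl_cons, pvExtract, List.flatMap_cons, List.foldl_append]
    rw [ih]
    cases pvLookup o "bonusListId" <;> rfl

-- B's inner loop collects the extracted sequence
theorem foldlB_eq (objs : List (List (String × Int))) (acc : List Int) :
    objs.foldl (fun acc obj =>
      match pvLookup obj "bonusListId" with
      | none => acc
      | some blid => acc ++ [blid]) acc
    = acc ++ pvExtract objs := by
  induction objs generalizing acc with
  | nil => simp [pvExtract]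
  | cons o os ih =>
    simp only [List.foldl_cons, pvExtract, List.flatMap_cons]
    rw [ih]
    cases pvLookup o "bonusListId" <;> simp [pvExtract]

-- B's second loop is pvDedupAdj
theorem foldl_dedupAdj (s : List Int) (acc : List Int) (prev : Option Int) :
    (s.foldl pvStep (acc, prev)).1 = acc ++ pvDedupAdj prev s := by
  induction s generalizing acc prev with
  | nil => simp [pvDedupAdj]
  | cons v vs ih =>
    rw [List.foldl_cons]
    cases prev with
    | none =>
      have hstep : pvStep (acc, none) v = (acc ++ [v], some v) := rfl
      rw [hstep, ih]
      simp [pvDedupAdj]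
    | some p =>
      by_cases h : v = p
      · subst h
        have hstep : pvStep (acc, some v) v = (acc, some v) := by simp [pvStep]
        rw [hstep, ih]
        simp [pvDedupAdj]
      · have hstep : pvStep (acc, some p) v = (acc ++ [v], some v) := by simp [pvStep, h]
        rw [hstep, ih]
        simp [pvDedupAdj, h]

-- first-occurrence dedup: nodup and membership
theorem dedupF_props (l : List Int) (acc : List Int) (hn : acc.Nodup) :
    (l.foldl (fun out b => if b ∈ out then out else out ++ [b]) acc).Nodup ∧
    (∀ x, x ∈ l.foldl (fun out b => if b ∈ out then out else out ++ [b]) acc ↔ x ∈ acc ∨ x ∈ l) := by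
  induction l generalizing acc with
  | nil => simp [hn]
  | cons b bs ih =>
    simp only [List.foldl_cons]
    by_cases hb : b ∈ acc
    · simp only [hb, if_pos]
      obtain ⟨h1, h2⟩ := ih acc hn
      refine ⟨h1, fun x => ?_⟩
      rw [h2]
      simp only [List.mem_cons]
      constructor
      · rintro (h | h)
        · exact Or.inl h
        · exact Or.inr (Or.inr h)
      · rintro (h | h | h)
        · exact Or.inl h
        · subst h; exact Or.inl hb
        · exact Or.inr h
    · simp only [hb, if_neg, not_false_iff]
      have hn' : (acc ++ [b]).Nodup := by
        rw [List.nodup_append]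
        refine ⟨hn, List.nodup_singleton b, ?_⟩
        intro a ha c hc
        simp only [List.mem_singleton] at hc
        subst hc
        exact fun hab => hb (hab ▸ ha)
      obtain ⟨h1, h2⟩ := ih (acc ++ [b]) hn'
      refine ⟨h1, fun x => ?_⟩
      rw [h2]
      simp [or_assoc]

-- adjacent dedup after a sorted prefix bound: strictly increasing, bounded below, membership
theorem dedupAdj_some_props (s : List Int) (p : Int)
    (hs : s.Pairwise (· ≤ ·)) (hb : ∀ x ∈ s, p ≤ x) :
    (pvDedupAdj (some p) s).Pairwise (· < ·) ∧
    (∀ x ∈ pvDedupAdj (some p) s, p < x) ∧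
    (∀ x, x ∈ pvDedupAdj (some p) s ↔ x ∈ s ∧ x ≠ p) := by
  induction s generalizing p with
  | nil => simp [pvDedupAdj]
  | cons v vs ih =>
    rw [List.pairwise_cons] at hs
    obtain ⟨hv, hvs⟩ := hs
    by_cases h : v = p
    · subst h
      simp only [pvDedupAdj, ne_eq, not_true_eq_false, if_false]
      obtain ⟨h1, h2, h3⟩ := ih v hvs hv
      refine ⟨h1, h2, fun x => ?_⟩
      rw [h3]
      constructor
      · rintro ⟨hx, hne⟩
        exact ⟨List.mem_cons_of_mem _ hx, hne⟩
      · rintro ⟨hx, hne⟩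
        rcases List.mem_cons.mp hx with hx | hx
        · exact absurd hx hne
        · exact ⟨hx, hne⟩
    · have hpv : p < v := lt_of_le_of_ne (hb v (List.mem_cons.mpr (Or.inl rfl))) (Ne.symm h)
      simp only [pvDedupAdj, ne_eq, h, not_false_iff, if_true]
      obtain ⟨h1, h2, h3⟩ := ih v hvs hv
      refine ⟨List.pairwise_cons.mpr ⟨h2, h1⟩, ?_, fun x => ?_⟩
      · intro x hx
        rcases List.mem_cons.mp hx with hx | hx
        · subst hx; exact hpv
        · exact lt_trans hpv (h2 x hx)
      · constructor
        · intro hx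
          rcases List.mem_cons.mp hx with hx | hx
          · subst hx
            exact ⟨List.mem_cons.mpr (Or.inl rfl), h⟩
          · obtain ⟨hx', hne⟩ := (h3 x).mp hx
            have hpx : p < x := lt_of_lt_of_le hpv (hv x hx')
            exact ⟨List.mem_cons_of_mem _ hx', ne_of_gt hpx⟩
        · rintro ⟨hx, hne⟩
          rcases List.mem_cons.mp hx with hx | hx
          · subst hx
            exact List.mem_cons.mpr (Or.inl rfl)
          · by_cases hxv : x = v
            · subst hxv
              exact List.mem_cons.mpr (Or.inl rfl)
            · exact List.mem_cons_of_mem _ ((h3 x).mpr ⟨hx, hxv⟩)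

theorem dedupAdj_none_props (s : List Int) (hs : s.Pairwise (· ≤ ·)) :
    (pvDedupAdj none s).Pairwise (· < ·) ∧ (∀ x, x ∈ pvDedupAdj none s ↔ x ∈ s) := by
  cases s with
  | nil => simp [pvDedupAdj]
  | cons v vs =>
    rw [List.pairwise_cons] at hs
    obtain ⟨hv, hvs⟩ := hs
    obtain ⟨h1, h2, h3⟩ := dedupAdj_some_props vs v hvs hv
    refine ⟨List.pairwise_cons.mpr ⟨h2, h1⟩, fun x => ?_⟩
    simp only [pvDedupAdj]
    constructor
    · intro hx
      rcases List.mem_cons.mp hx with hx | hx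
      · subst hx; exact List.mem_cons.mpr (Or.inl rfl)
      · exact List.mem_cons_of_mem _ ((h3 x).mp hx).1
    · intro hx
      rcases List.mem_cons.mp hx with hx | hx
      · subst hx; exact List.mem_cons.mpr (Or.inl rfl)
      · by_cases hxv : x = v
        · subst hxv; exact List.mem_cons.mpr (Or.inl rfl)
        · exact List.mem_cons_of_mem _ ((h3 x).mpr ⟨hx, hxv⟩)

-- the core equivalence: sorted first-occurrence dedup = adjacent dedup of the sorted list
theorem main_lemma (l : List Int) :
    PySem.List.sorted (l.foldl (fun out b => if b ∈ out then out else out ++ [b]) []) (fun x => x) false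
    = pvDedupAdj none (PySem.List.sorted l (fun x => x) false) := by
  set s := PySem.List.sorted l (fun x => x) false with hsdef
  have hsp : s.Pairwise (· ≤ ·) := PySem.List.sorted_pairwise l (fun x => x)
  have hmem_s : ∀ x : Int, x ∈ s ↔ x ∈ l := fun x => PySem.List.mem_sorted l (fun x => x) false x
  obtain ⟨hpl, hmem⟩ := dedupAdj_none_props s hsp
  obtain ⟨hdn, hdm⟩ := dedupF_props l [] List.nodup_nil
  apply PySem.List.sorted_eq_of_perm_of_pairwise_lt
  · rw [List.perm_ext_iff_of_nodup (hpl.imp (fun h => ne_of_lt h)) hdn]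
    intro x
    rw [hmem, hdm, hmem_s]
    simp
  · exact hpl

-- ===== VERDICT (by name: the statement is the Claim_ definition above) =====
theorem get_bonus_lists_py_spec : Claim_equal_get_bonus_lists_py := by
  intro auc _
  unfold Spec_get_bonus_lists_py get_bonus_lists_py get_bonus_lists_py_alt
  cases pvLookup auc "bonusLists" with
  | none => rfl
  | some objs =>
    simp only []
    rw [foldlA_eq, foldlB_eq, foldl_dedupAdj]
    simp only [List.nil_append]
    exact main_lemma (pvExtract objs)
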